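-- pv_equiv track=rewrite | github.com/dalision/DataMiningPJ | Webshell_checker.py | samelenline_cnt
-- ===== SOURCE A (Python) =====
-- def samelenline_cnt(f):
--     string = f.splitlines()
--     if len(string) == 1:
--         return 0
--     sub = 0
--     i = 0
--     while i < len(string):
--         if i == 0:
--             if string[i] != string[i + 1]:
--                 sub += 1
--         elif i == len(string) - 1:
--             if string[i] != string[i - 1]:
--                 sub += 1
--         else:
--             if string[i] != string[i - 1] and string[i] != string[i + 1]:
--                 sub += 1
--         i += 1
--     return len(string) - sub
-- ===== SOURCE B (Python) =====
-- def samelenline_cnt(f):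
--     # One pass over the lines maintaining the current run of equal consecutive
--     # lines; add the run's length to the total whenever a run of length >= 2 ends.
--     total = 0
--     run = 0
--     prev = None
--     for line in f.splitlines():
--         if run > 0 and line == prev:
--             run += 1
--         else:
--             if run >= 2:
--                 total += run
--             run = 1
--         prev = line
--     if run >= 2:
--         total += run
--     return total
-- ===== Notes on version B (the rewrite author's own statement) =====
-- stated objective: alternative
-- what changed: A classifies every index by a three-branch neighbor test (first/last/middle), counts 'unique' lines and returns len - sub; B makes one run-length pass over the lines and directly accumulates the length of every maximal run of >= 2 equal consecutive lines.
import Mathlib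
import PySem

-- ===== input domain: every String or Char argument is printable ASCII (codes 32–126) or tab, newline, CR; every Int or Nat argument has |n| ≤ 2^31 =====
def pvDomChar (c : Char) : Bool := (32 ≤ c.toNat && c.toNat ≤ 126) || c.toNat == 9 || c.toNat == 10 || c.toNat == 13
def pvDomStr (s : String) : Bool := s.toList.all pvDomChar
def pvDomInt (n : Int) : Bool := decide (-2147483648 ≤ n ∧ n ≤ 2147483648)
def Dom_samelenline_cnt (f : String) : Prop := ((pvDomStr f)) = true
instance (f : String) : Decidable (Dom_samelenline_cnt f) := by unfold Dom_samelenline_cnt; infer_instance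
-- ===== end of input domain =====

-- B replaces A's three-branch neighbor test and subtraction (len - sub) by a single
-- run-length pass that directly accumulates the lengths of runs of ≥ 2 equal
-- consecutive lines (objective: alternative; same O(n) cost).

-- ===== PORT A =====
-- while loop of A: i, sub; every index A actually reads is in range (the len==1
-- case returns before the loop), so getD with default "" is exact here.
def pvLoopA (s : List String) (i : Nat) (sub : Int) : Int :=
  if h : i < s.length then
    let sub' :=
      if i = 0 then
        (if s.getD i "" ≠ s.getD (i+1) "" then sub + 1 else sub)
      else if i = s.length - 1 then
        (if s.getD i "" ≠ s.getD (i-1) "" then sub + 1 else sub)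
      else
        (if s.getD i "" ≠ s.getD (i-1) "" ∧ s.getD i "" ≠ s.getD (i+1) "" then sub + 1 else sub)
    pvLoopA s (i+1) sub'
  else sub
termination_by s.length - i
decreasing_by omega

def samelenline_cnt (f : String) : Int :=
  let string := PySem.Str.splitlines f
  if string.length = 1 then 0
  else (string.length : Int) - pvLoopA string 0 0

-- ===== PORT B =====
-- for-loop of B: state (total, run, prev); `line == prev` with prev possibly None.
def pvLoopB : List String → Int → Int → Option String → Int
  | [], total, run, _ => if 2 ≤ run then total + run else total
  | line :: rest, total, run, prev =>
    if 0 < run ∧ prev = some line then pvLoopB rest total (run + 1) (some line)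
    else pvLoopB rest (if 2 ≤ run then total + run else total) 1 (some line)

def samelenline_cnt_alt (f : String) : Int :=
  pvLoopB (PySem.Str.splitlines f) 0 0 none

-- ===== PRECONDITION & SPEC =====
def Spec_samelenline_cnt (f : String) (out : Int) : Prop := out = samelenline_cnt_alt f
instance (f : String) (out : Int) : Decidable (Spec_samelenline_cnt f out) := by unfold Spec_samelenline_cnt; infer_instance

-- ===== CLAIM (what is proved, stated in full; the proofs are below) =====
def Claim_equal_samelenline_cnt : Prop := ∀ (f : String), Dom_samelenline_cnt f → Spec_samelenline_cnt f (samelenline_cnt f)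

-- ===== LEMMAS AND PROOFS =====

-- indicator of A's "no equal neighbor" condition at index j
def pvNoInd (s : List String) (j : Nat) : Int :=
  if j = 0 then
    (if s.getD j "" ≠ s.getD (j+1) "" then 1 else 0)
  else if j = s.length - 1 then
    (if s.getD j "" ≠ s.getD (j-1) "" then 1 else 0)
  else
    (if s.getD j "" ≠ s.getD (j-1) "" ∧ s.getD j "" ≠ s.getD (j+1) "" then 1 else 0)

-- indicator of "has an equal adjacent neighbor" at index j
def pvHasInd (s : List String) (j : Nat) : Int :=
  if (j ≠ 0 ∧ s.getD j "" = s.getD (j-1) "") ∨ (j + 1 < s.length ∧ s.getD j "" = s.getD (j+1) "") then 1 else 0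

-- same, with the previous element p supplied explicitly (for index shifting)
def pvHasIndP (p : String) (t : List String) (j : Nat) : Int :=
  if (t.getD j "" = (if j = 0 then p else t.getD (j-1) "")) ∨ (j + 1 < t.length ∧ t.getD j "" = t.getD (j+1) "") then 1 else 0

-- structural count: elements of l having an equal adjacent neighbor, prev element p
def pvG : String → List String → Int
  | _, [] => 0
  | p, c :: u => (if c = p ∨ u.head? = some c then 1 else 0) + pvG c u

theorem pvLoopA_eq_sum (s : List String) :
    ∀ k i sub, s.length - i = k → pvLoopA s i sub = sub + ∑ j ∈ Finset.Ico i s.length, pvNoInd s j := by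
  intro k
  induction k with
  | zero =>
    intro i sub h
    rw [pvLoopA, dif_neg (by omega), Finset.Ico_eq_empty (by omega), Finset.sum_empty, add_zero]
  | succ k IH =>
    intro i sub h
    have hi : i < s.length := by omega
    rw [pvLoopA, dif_pos hi, IH (i+1) _ (by omega), Finset.sum_eq_sum_Ico_succ_bot hi]
    simp only [pvNoInd]
    split_ifs <;> ring

theorem sum_hasIndP_eq_pvG (t : List String) : ∀ p,
    (∑ j ∈ Finset.range t.length, pvHasIndP p t j) = pvG p t := by
  induction t with
  | nil => intro p; simp [pvG]
  | cons c u IH =>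
    intro p
    rw [List.length_cons, Finset.sum_range_succ']
    have hshift : ∀ j, pvHasIndP p (c :: u) (j + 1) = pvHasIndP c u j := by
      intro j
      cases j with
      | zero => simp [pvHasIndP, Nat.lt_iff_add_one_le]
      | succ m => simp [pvHasIndP]
    have hzero : pvHasIndP p (c :: u) 0 = (if c = p ∨ u.head? = some c then 1 else 0) := by
      cases u with
      | nil => simp [pvHasIndP]
      | cons d v => simp [pvHasIndP, eq_comm]
    rw [hzero, Finset.sum_congr rfl (fun j _ => hshift j), IH c, pvG]
    ring

theorem pvLoopB_inv (l : List String) : ∀ total run p, 1 ≤ run →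
    pvLoopB l total run (some p) =
      total + (if 2 ≤ run ∨ l.head? = some p then run else 0) + pvG p l := by
  induction l with
  | nil =>
    intro total run p _
    simp only [pvLoopB, pvG, List.head?_nil, show ((none : Option String) = some p) = False by simp,
      or_false, add_zero]
    split_ifs <;> ring
  | cons c rest IH =>
    intro total run p hrun
    by_cases hpc : p = c
    · rw [pvLoopB, if_pos ⟨by omega, by rw [hpc]⟩, IH total (run + 1) c (by omega)]
      simp only [List.head?_cons, pvG]
      rw [if_pos (Or.inl (by omega : (2:Int) ≤ run + 1)), if_pos (Or.inr (by rw [hpc])),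
        if_pos (Or.inl hpc.symm)]
      ring
    · have hcp : ¬ (c = p) := fun h => hpc h.symm
      rw [pvLoopB, if_neg (by simp only [Option.some.injEq]; exact fun h => absurd h.2 hpc),
        IH _ 1 c (le_refl 1)]
      simp only [List.head?_cons, pvG, Option.some.injEq, eq_false hcp, false_or, or_false,
        show (((2:Int) ≤ 1)) = False by norm_num]
      split_ifs <;> ring

theorem sum_hasInd_eq (s : List String) :
    (∑ j ∈ Finset.range s.length, pvHasInd s j) = pvLoopB s 0 0 none := by
  cases s with
  | nil => simp [pvLoopB]
  | cons a t =>
    have hstep : pvLoopB (a :: t) 0 0 none = pvLoopB t 0 1 (some a) := by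
      rw [pvLoopB, if_neg (by simp)]
      norm_num
    rw [hstep, pvLoopB_inv t 0 1 a (le_refl 1), List.length_cons, Finset.sum_range_succ']
    have hshift : ∀ j, pvHasInd (a :: t) (j + 1) = pvHasIndP a t j := by
      intro j
      cases j with
      | zero => simp only [pvHasInd, pvHasIndP]; simp; rfl
      | succ m => simp [pvHasInd, pvHasIndP]
    have hzero : pvHasInd (a :: t) 0 = (if t.head? = some a then 1 else 0) := by
      cases t with
      | nil => simp [pvHasInd]
      | cons d v => simp [pvHasInd, eq_comm]
    rw [hzero, Finset.sum_congr rfl (fun j _ => hshift j), sum_hasIndP_eq_pvG t a]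
    have h21 : ¬ ((2:Int) ≤ 1) := by norm_num
    simp only [h21, false_or]
    split_ifs <;> ring

theorem noInd_add_hasInd (s : List String) (j : Nat) (hj : j < s.length) (hn : s.length ≠ 1) :
    pvNoInd s j + pvHasInd s j = 1 := by
  unfold pvNoInd pvHasInd
  rcases Nat.eq_zero_or_pos j with hj0 | hj0
  · subst hj0
    have h1 : 0 + 1 < s.length := by omega
    simp only [ne_eq, not_true_eq_false, false_and, false_or, h1, true_and]
    split_ifs <;> norm_num
  · have hj0' : j ≠ 0 := by omega
    rw [if_neg hj0']
    by_cases hl : j = s.length - 1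
    · rw [if_pos hl]
      have h2 : ¬ (j + 1 < s.length) := by omega
      simp only [ne_eq, hj0', not_false_eq_true, true_and, h2, false_and, or_false]
      split_ifs <;> norm_num
    · rw [if_neg hl]
      have h2 : j + 1 < s.length := by omega
      simp only [ne_eq, hj0', not_false_eq_true, true_and, h2]
      split_ifs <;> first | (exfalso; tauto) | norm_num

theorem main_lemma (s : List String) :
    (if s.length = 1 then 0 else (s.length : Int) - pvLoopA s 0 0) = pvLoopB s 0 0 none := by
  by_cases h1 : s.length = 1
  · rw [if_pos h1]
    match s, h1 with
    | [a], _ =>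
      rw [pvLoopB, if_neg (by simp), pvLoopB]
      norm_num
  · rw [if_neg h1, pvLoopA_eq_sum s s.length 0 0 (by omega), zero_add, ← Finset.range_eq_Ico]
    have hpt : ∀ j ∈ Finset.range s.length, pvNoInd s j = 1 - pvHasInd s j := by
      intro j hj
      have := noInd_add_hasInd s j (Finset.mem_range.mp hj) h1
      omega
    rw [Finset.sum_congr rfl hpt, Finset.sum_sub_distrib, Finset.sum_const, Finset.card_range,
      nsmul_eq_mul, mul_one, sum_hasInd_eq]
    ring

-- ===== VERDICT (by name: the statement is the Claim_ definition above) =====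
theorem samelenline_cnt_spec : Claim_equal_samelenline_cnt := by
  intro f _
  unfold Spec_samelenline_cnt samelenline_cnt samelenline_cnt_alt
  exact main_lemma (PySem.Str.splitlines f)
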